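-- pv_equiv track=rewrite | github.com/kfbenz/aosParishStaqPortal | app/routes_duplicates.py | format_activity_line
-- ===== SOURCE A (Python) =====
-- def format_activity_line(activity: dict) -> str:
--     """Format activity dict into a display string"""
--     if not activity:
--         return ""
--
--     # Priority order for display
--     display_order = [
--         'Last Gift',
--         'Last Scheduled Gift',
--         'Last Pledge',
--         'Last Attended',
--         'Last Served',
--         'Last Profile Update'
--     ]
--
--     parts = []
--     for activity_type in display_order:
--         if activity_type in activity:
--             parts.append(f"{activity_type}: {activity[activity_type]}")
--
--     # Add any other activity types not in the priority list
--     for activity_type, date in activity.items():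
--         if activity_type not in display_order:
--             parts.append(f"{activity_type}: {date}")
--
--     return " | ".join(parts)
-- ===== SOURCE B (Python) =====
-- def format_activity_line(activity: dict) -> str:
--     """Format activity dict into a display string"""
--     display_order = [
--         'Last Gift',
--         'Last Scheduled Gift',
--         'Last Pledge',
--         'Last Attended',
--         'Last Served',
--         'Last Profile Update'
--     ]
--     rank = {name: i for i, name in enumerate(display_order)}
--     items = sorted(activity.items(), key=lambda kv: rank.get(kv[0], len(display_order)))
--     return " | ".join(f"{k}: {v}" for k, v in items)
-- ===== Notes on version B (the rewrite author's own statement) =====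
-- stated objective: idiomatic
-- what changed: Replaced A's two sequential scans (one pass over the 6-name priority list with dict lookups, then a second pass over the items for leftovers) by building a name-to-rank table once and doing a single stable sort of the items keyed by rank (default rank = len(display_order)), then joining.
import Mathlib
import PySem

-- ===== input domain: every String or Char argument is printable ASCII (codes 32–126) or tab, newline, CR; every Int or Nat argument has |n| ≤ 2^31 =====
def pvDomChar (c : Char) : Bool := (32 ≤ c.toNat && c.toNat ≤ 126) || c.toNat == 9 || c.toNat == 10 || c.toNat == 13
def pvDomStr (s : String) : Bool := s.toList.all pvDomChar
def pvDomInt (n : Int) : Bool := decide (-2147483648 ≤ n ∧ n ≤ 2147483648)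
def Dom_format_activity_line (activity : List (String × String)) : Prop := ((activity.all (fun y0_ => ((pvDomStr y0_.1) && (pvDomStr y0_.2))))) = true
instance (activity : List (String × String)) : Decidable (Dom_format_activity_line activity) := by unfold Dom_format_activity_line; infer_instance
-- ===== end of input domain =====

-- B replaces A's two sequential passes (priority-name loop, then leftovers loop) by a rank
-- table and ONE stable sort of the items keyed by rank; idiomatic, not claimed faster.

-- the priority list, shared verbatim by both Pythons
def displayOrderPV : List String :=
  ["Last Gift", "Last Scheduled Gift", "Last Pledge",
   "Last Attended", "Last Served", "Last Profile Update"]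

-- ===== PORT A =====
def format_activity_line (activity : List (String × String)) : String :=
  if activity.isEmpty then "" else
  -- the dict view of the input (lookup = first match; Pre_ demands unique keys)
  let d := PySem.Dict.mk activity
  -- first loop: priority names present in the dict ('t in activity' + 'activity[t]' = lookup success)
  let parts := displayOrderPV.foldl (fun parts t =>
    match d.get? t with
    | some v => parts ++ [t ++ ": " ++ v]
    | none => parts) ([] : List String)
  -- second loop: remaining items, insertion order
  let parts := activity.foldl (fun parts kv =>
    if !displayOrderPV.contains kv.1 then parts ++ [kv.1 ++ ": " ++ kv.2] else parts) parts
  PySem.Str.join " | " parts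

-- ===== PORT B =====
def format_activity_line_alt (activity : List (String × String)) : String :=
  -- rank = {name: i for i, name in enumerate(display_order)}
  let rank : PySem.Dict String Int :=
    PySem.Dict.ofList ((PySem.List.enumerate displayOrderPV).map (fun p => (p.2, p.1)))
  -- sorted(activity.items(), key=lambda kv: rank.get(kv[0], len(display_order))) — stable
  let items := PySem.List.sorted activity (fun kv => rank.getD kv.1 (displayOrderPV.length : Int)) false
  PySem.Str.join " | " (items.map (fun kv => kv.1 ++ ": " ++ kv.2))

-- ===== PRECONDITION & SPEC =====
-- Pre_ excludes association lists with duplicate keys: they cannot arise from a Python dict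
-- (Python collapses duplicates at dict construction), so the assoc-list behaviour there is accidental.
def Pre_format_activity_line (activity : List (String × String)) : Prop :=
  (activity.map Prod.fst).Nodup
instance (activity : List (String × String)) : Decidable (Pre_format_activity_line activity) := by
  unfold Pre_format_activity_line; infer_instance

def pvWitness_format_activity_line : (List (String × String)) :=
  [("Custom Note", "2024-05-01"), ("Last Gift", "2024-01-31")]

def Spec_format_activity_line (activity : List (String × String)) (out : String) : Prop :=
  out = format_activity_line_alt activity
instance (activity : List (String × String)) (out : String) : Decidable (Spec_format_activity_line activity out) := by
  unfold Spec_format_activity_line; infer_instance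

-- ===== CLAIM (what is proved, stated in full; the proofs are below) =====
def Claim_equal_format_activity_line : Prop := ∀ (activity : List (String × String)), Dom_format_activity_line activity → Pre_format_activity_line activity → Spec_format_activity_line activity (format_activity_line activity)

-- ===== LEMMAS AND PROOFS =====

-- B's key function with the rank dict and the default written as literals
def keyFPV (k : String) : Int :=
  PySem.Dict.getD (PySem.Dict.mk
    [("Last Gift", 0), ("Last Scheduled Gift", 1), ("Last Pledge", 2),
     ("Last Attended", 3), ("Last Served", 4), ("Last Profile Update", 5)]) k 6

-- B's rank/key expression computes keyFPV
theorem keyFPV_eq (kv : String × String) :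
    PySem.Dict.getD (PySem.Dict.ofList ((PySem.List.enumerate displayOrderPV).map (fun p => (p.2, p.1)))) kv.1 (displayOrderPV.length : Int)
    = keyFPV kv.1 := by
  have h : PySem.Dict.ofList ((PySem.List.enumerate displayOrderPV).map (fun p => (p.2, p.1)))
      = PySem.Dict.mk
    [("Last Gift", 0), ("Last Scheduled Gift", 1), ("Last Pledge", 2),
     ("Last Attended", 3), ("Last Served", 4), ("Last Profile Update", 5)] := by decide
  rw [h]; rfl

theorem keyFPV_bounds (k : String) : 0 ≤ keyFPV k ∧ keyFPV k < 7 := by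
  unfold keyFPV
  simp only [PySem.Dict.getD, PySem.Dict.get?_mk_cons]
  split_ifs <;> simp [PySem.Dict.get?]

theorem keyFPV_ite (k : String) :
    keyFPV k =
      if k = "Last Gift" then 0 else if k = "Last Scheduled Gift" then 1
      else if k = "Last Pledge" then 2 else if k = "Last Attended" then 3
      else if k = "Last Served" then 4 else if k = "Last Profile Update" then 5 else 6 := by
  unfold keyFPV
  simp only [PySem.Dict.getD, PySem.Dict.get?_mk_cons, beq_iff_eq]
  by_cases h1 : k = "Last Gift" <;> by_cases h2 : k = "Last Scheduled Gift" <;>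
  by_cases h3 : k = "Last Pledge" <;> by_cases h4 : k = "Last Attended" <;>
  by_cases h5 : k = "Last Served" <;> by_cases h6 : k = "Last Profile Update" <;>
    simp [h1, h2, h3, h4, h5, h6, eq_comm, PySem.Dict.get?]

-- which key value corresponds to which name (and 6 = 'not a priority name')
theorem keyFPV_bool (k : String) :
    decide (keyFPV k = 0) = (k == "Last Gift") ∧
    decide (keyFPV k = 1) = (k == "Last Scheduled Gift") ∧
    decide (keyFPV k = 2) = (k == "Last Pledge") ∧
    decide (keyFPV k = 3) = (k == "Last Attended") ∧
    decide (keyFPV k = 4) = (k == "Last Served") ∧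
    decide (keyFPV k = 5) = (k == "Last Profile Update") ∧
    decide (keyFPV k = 6) = !displayOrderPV.contains k := by
  rw [keyFPV_ite]
  by_cases h1 : k = "Last Gift" <;> by_cases h2 : k = "Last Scheduled Gift" <;>
  by_cases h3 : k = "Last Pledge" <;> by_cases h4 : k = "Last Attended" <;>
  by_cases h5 : k = "Last Served" <;> by_cases h6 : k = "Last Profile Update" <;>
    simp [h1, h2, h3, h4, h5, h6, displayOrderPV]

-- the r-th bucket of a stable sort on Int keys: elements with key = r, in list order
def bktsPV {α : Type} (key : α → Int) (n : Nat) (l : List α) : List α :=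
  (List.range n).flatMap (fun (r : Nat) => l.filter (fun x => decide (key x = (r : Int))))

-- insertion before a tail that is entirely 'after' x commutes with the append
theorem insertBy_append_all_before {α : Type} (p : α → α → Bool) (x : α) (ys zs : List α)
    (h : ∀ z ∈ zs, p x z = true) :
    PySem.List.insertBy p x (ys ++ zs) = PySem.List.insertBy p x ys ++ zs := by
  induction ys with
  | nil =>
    cases zs with
    | nil => rfl
    | cons z t => simp [PySem.List.insertBy, h z List.mem_cons_self]
  | cons y t ih =>
    simp only [List.cons_append, PySem.List.insertBy]
    by_cases hy : p x y = true
    · simp [hy]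
    · simp only [Bool.not_eq_true] at hy
      simp [hy, ih]

-- appending an element whose key hits no bucket leaves the buckets unchanged
theorem bktsPV_append_single {α : Type} (key : α → Int) (n : Nat) (l : List α) (x : α)
    (h : ∀ r : Nat, r < n → key x ≠ (r : Int)) :
    bktsPV key n (l ++ [x]) = bktsPV key n l := by
  unfold bktsPV
  apply List.flatMap_congr
  intro r hr
  rw [List.filter_append]
  simp [h r (List.mem_range.mp hr)]

theorem mem_bktsPV_key_lt {α : Type} (key : α → Int) (n : Nat) (l : List α) (y : α)
    (h : y ∈ bktsPV key n l) : ∃ r : Nat, r < n ∧ key y = (r : Int) := by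
  unfold bktsPV at h
  simp only [List.mem_flatMap, List.mem_range, List.mem_filter, decide_eq_true_eq] at h
  obtain ⟨r, hr, _, hk⟩ := h
  exact ⟨r, hr, hk⟩

-- inserting x (key in range) into the buckets appends it to its own bucket
theorem insertBy_bktsPV {α : Type} (key : α → Int) (n : Nat) (l : List α) (x : α)
    (h0 : 0 ≤ key x) (hn : key x < (n : Int)) :
    PySem.List.insertBy (fun a b => decide (key a < key b)) x (bktsPV key n l)
      = bktsPV key n (l ++ [x]) := by
  induction n with
  | zero => simp at hn; omega
  | succ m ih =>
    have hsplit : ∀ (l' : List α), bktsPV key (m+1) l' = bktsPV key m l' ++ l'.filter (fun z => decide (key z = (m : Int))) := by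
      intro l'; unfold bktsPV; rw [List.range_succ, List.flatMap_append]; simp
    by_cases hx : key x = (m : Int)
    · rw [hsplit l, hsplit (l ++ [x])]
      rw [PySem.List.insertBy_of_forall_not_before]
      · rw [bktsPV_append_single key m l x
          (by intro r hr hc; rw [hx] at hc; have := Nat.cast_inj.mp hc; omega)]
        simp [hx, List.filter_append, List.append_assoc]
      · intro y hy
        rcases List.mem_append.mp hy with hy1 | hy2
        · obtain ⟨r, hr, hk⟩ := mem_bktsPV_key_lt key m l y hy1
          simp only [decide_eq_false_iff_not, not_lt, hx, hk]
          exact_mod_cast Nat.le_of_lt hr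
        · have := (List.mem_filter.mp hy2).2
          simp only [decide_eq_true_eq] at this
          simp [this, hx]
    · have hxm : key x < (m : Int) := by push_cast at hn ⊢; omega
      rw [hsplit l, hsplit (l ++ [x])]
      rw [insertBy_append_all_before]
      · rw [ih hxm]
        congr 1
        rw [List.filter_append]
        simp [hx]
      · intro z hz
        have := (List.mem_filter.mp hz).2
        simp only [decide_eq_true_eq] at this
        simp [this, hxm]

-- stability: a stable sort on Int keys bounded by n IS the n buckets concatenated in key order
theorem sorted_eq_bktsPV {α : Type} (key : α → Int) (n : Nat) (l : List α)
    (h : ∀ x ∈ l, 0 ≤ key x ∧ key x < (n : Int)) :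
    PySem.List.sorted l key false = bktsPV key n l := by
  induction l using List.reverseRecOn with
  | nil => simp [PySem.List.sorted_eq_foldl_insertBy, bktsPV]
  | append_singleton t x ih =>
    rw [PySem.List.sorted_eq_foldl_insertBy, List.foldl_append, List.foldl_cons, List.foldl_nil,
        ← PySem.List.sorted_eq_foldl_insertBy]
    rw [ih (fun y hy => h y (List.mem_append_left _ hy))]
    exact insertBy_bktsPV key n t x (h x (by simp)).1 (h x (by simp)).2

-- with unique keys, the sub-list of pairs keyed 'name' is exactly the first-match lookup
theorem filter_eq_lookup (activity : List (String × String)) (name : String)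
    (hnd : (activity.map Prod.fst).Nodup) :
    activity.filter (fun kv => kv.1 == name)
      = (match (PySem.Dict.mk activity).get? name with
         | some v => [(name, v)]
         | none => ([] : List (String × String))) := by
  induction activity with
  | nil => simp [PySem.Dict.get?]
  | cons kv t ih =>
    simp only [List.map_cons, List.nodup_cons] at hnd
    rw [List.filter_cons, PySem.Dict.get?_mk_cons]
    by_cases hk : kv.1 = name
    · have hbeq : (kv.1 == name) = true := by simp [hk]
      simp only [hbeq, if_pos]
      simp [← hk]
      intro a b hab hc
      exact hnd.1 (hc ▸ List.mem_map_of_mem hab)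
    · have hbeq : (kv.1 == name) = false := by simp [hk]
      simp only [hbeq, Bool.false_eq_true, if_false]
      exact ih hnd.2

-- A's first loop as a flatMap of per-name optional singletons
theorem foldl_match_append (d : PySem.Dict String String) (l : List String) (acc : List String) :
    l.foldl (fun parts t => match d.get? t with
      | some v => parts ++ [t ++ ": " ++ v]
      | none => parts) acc
    = acc ++ l.flatMap (fun t => match d.get? t with
      | some v => [t ++ ": " ++ v]
      | none => []) := by
  induction l generalizing acc with
  | nil => simp
  | cons t ts ih =>
    rw [List.foldl_cons, List.flatMap_cons, ih]
    cases h : d.get? t <;> simp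

-- one priority bucket, formatted
theorem bucket_name (act : List (String × String)) (name : String) (r : Nat)
    (hb : ∀ k : String, decide (keyFPV k = (r : Int)) = (k == name))
    (hnd : (act.map Prod.fst).Nodup) :
    (act.filter (fun kv => decide (keyFPV kv.1 = (r : Int)))).map (fun kv => kv.1 ++ ": " ++ kv.2)
      = (match (PySem.Dict.mk act).get? name with
         | some v => [name ++ ": " ++ v]
         | none => []) := by
  rw [List.filter_congr (fun kv _ => hb kv.1), filter_eq_lookup act name hnd]
  cases h : (PySem.Dict.mk act).get? name <;> simp

-- A's parts list = B's sorted items, formatted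
theorem parts_eq (act : List (String × String)) (hnd : (act.map Prod.fst).Nodup) :
    (displayOrderPV.flatMap (fun t => match (PySem.Dict.mk act).get? t with
        | some v => [t ++ ": " ++ v]
        | none => []))
      ++ (act.filter (fun kv => !displayOrderPV.contains kv.1)).map (fun kv => kv.1 ++ ": " ++ kv.2)
    = (PySem.List.sorted act (fun kv => keyFPV kv.1) false).map (fun kv => kv.1 ++ ": " ++ kv.2) := by
  rw [sorted_eq_bktsPV (fun kv => keyFPV kv.1) 7 act
      (fun x _ => by have := keyFPV_bounds x.1; push_cast; exact this)]
  have hrange : List.range 7 = [0, 1, 2, 3, 4, 5, 6] := by decide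
  rw [bktsPV, hrange]
  simp only [List.flatMap_cons, List.flatMap_nil, List.append_nil, List.map_append]
  rw [bucket_name act "Last Gift" 0 (fun k => by exact_mod_cast (keyFPV_bool k).1) hnd,
      bucket_name act "Last Scheduled Gift" 1 (fun k => by exact_mod_cast (keyFPV_bool k).2.1) hnd,
      bucket_name act "Last Pledge" 2 (fun k => by exact_mod_cast (keyFPV_bool k).2.2.1) hnd,
      bucket_name act "Last Attended" 3 (fun k => by exact_mod_cast (keyFPV_bool k).2.2.2.1) hnd,
      bucket_name act "Last Served" 4 (fun k => by exact_mod_cast (keyFPV_bool k).2.2.2.2.1) hnd,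
      bucket_name act "Last Profile Update" 5 (fun k => by exact_mod_cast (keyFPV_bool k).2.2.2.2.2.1) hnd]
  have h6 : act.filter (fun kv => decide (keyFPV kv.1 = ((6 : Nat) : Int)))
      = act.filter (fun kv => !displayOrderPV.contains kv.1) :=
    List.filter_congr (fun kv _ => by exact_mod_cast (keyFPV_bool kv.1).2.2.2.2.2.2)
  rw [h6]
  simp [displayOrderPV, List.flatMap_cons, List.append_assoc]

theorem main_eq (act : List (String × String)) (hnd : (act.map Prod.fst).Nodup) :
    format_activity_line act = format_activity_line_alt act := by
  by_cases hemp : act = []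
  · subst hemp; rfl
  · unfold format_activity_line format_activity_line_alt
    rw [if_neg (by simpa [List.isEmpty_iff] using hemp)]
    simp only [keyFPV_eq]
    rw [foldl_match_append, PySem.List.foldl_append_if
      (fun kv : String × String => !displayOrderPV.contains kv.1)
      (fun kv => kv.1 ++ ": " ++ kv.2), List.nil_append, parts_eq act hnd]

-- ===== VERDICT (by name: the statement is the Claim_ definition above) =====
theorem format_activity_line_spec : Claim_equal_format_activity_line := by
  intro activity _ hpre
  unfold Spec_format_activity_line
  exact main_eq activity hpre
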